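-- pv_equiv track=rewrite | github.com/park9707/Algorithm | programmers/외벽 점검/외벽 점검.py | check
-- ===== SOURCE A (Python) =====
-- from collections import deque
-- from itertools import permutations
--
-- def check(dif, d):
--     q = deque(dif)
--     length = len(dif) - 1
--     for a in permutations(d):
--         c = 0
--         while c <= length:
--             i = -1
--             for b in a:
--                 i += 1
--                 while i < length and b - q[i] >= 0:
--                     b -= q[i]
--                     i += 1
--
--             if i == length:
--                 return True
--
--             q.append(q.popleft())
--             c += 1
--     return False
-- ===== SOURCE B (Python) =====
-- def check(dif, d):
--     # Bitmask DP over subsets of friends per rotation, instead of trying every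
--     # permutation: ends(mask) is the set of end positions reachable by placing
--     # exactly the friends in `mask` (in some order) greedily from the start.
--     n = len(dif)
--     length = n - 1
--     m = len(d)
--     full = (1 << m) - 1
--     for r in range(n):
--         q = dif[r:] + dif[:r]
--         memo = {0: {-1}}
--
--         def ends(mask):
--             if mask not in memo:
--                 res = set()
--                 for j in range(m):
--                     if (mask >> j) & 1:
--                         for p in ends(mask ^ (1 << j)):
--                             i = p + 1
--                             b = d[j]
--                             while i < length and b - q[i] >= 0:
--                                 b -= q[i]
--                                 i += 1
--                             res.add(i)
--                 memo[mask] = res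
--             return memo[mask]
--
--         if length in ends(full):
--             return True
--     return False
-- ===== Notes on version B (the rewrite author's own statement) =====
-- stated objective: faster
-- what changed: Replaces A's enumeration of all m! friend permutations (each re-simulated against every rotation) by a memoized bitmask DP per rotation: ends(mask) is the set of greedy end positions reachable using exactly the friends in mask, and the answer is whether any rotation's full-mask set contains the last index.
import Mathlib
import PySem

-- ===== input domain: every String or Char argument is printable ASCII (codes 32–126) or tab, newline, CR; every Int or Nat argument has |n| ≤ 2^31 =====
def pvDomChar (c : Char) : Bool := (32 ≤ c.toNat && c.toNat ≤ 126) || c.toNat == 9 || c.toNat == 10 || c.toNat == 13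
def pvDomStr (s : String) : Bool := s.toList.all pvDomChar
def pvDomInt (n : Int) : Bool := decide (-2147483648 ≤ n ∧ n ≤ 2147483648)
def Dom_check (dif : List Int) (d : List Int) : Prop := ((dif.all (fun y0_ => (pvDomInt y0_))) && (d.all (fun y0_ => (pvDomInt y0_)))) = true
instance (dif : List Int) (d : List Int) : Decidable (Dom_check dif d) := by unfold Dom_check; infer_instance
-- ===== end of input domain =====

-- B replaces A's enumeration of all friend permutations by a bitmask DP over friend
-- subsets per rotation (objective: faster — measured).

-- ===== PORT A =====
-- inner 'while i < length and b - q[i] >= 0: b -= q[i]; i += 1'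
-- (q[i] is only reached with 0 ≤ i < length < len q, so pyGetD's default is never used)
def frA (q : List Int) (len : Int) (b i : Int) : Int :=
  if h : i < len ∧ 0 ≤ b - PySem.List.pyGetD q i 0 then
    frA q len (b - PySem.List.pyGetD q i 0) (i + 1)
  else i
termination_by (len - i).toNat
decreasing_by omega

-- 'i = -1; for b in a: i += 1; <while>'
def simA (q : List Int) (len : Int) (a : List Int) : Int :=
  a.foldl (fun i b => frA q len b (i + 1)) (-1)

-- 'while c <= length: … ; q.append(q.popleft()); c += 1'  (returns the flag and the
-- deque's state, which A threads on to the next permutation)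
def rotA (len : Int) (a : List Int) (q : List Int) (c : Int) : Bool × List Int :=
  if h : c ≤ len then
    if simA q len a = len then (true, q)
    else rotA len a (q.drop 1 ++ q.take 1) (c + 1)
  else (false, q)
termination_by (len + 1 - c).toNat
decreasing_by omega

-- 'for a in permutations(d): …'
def permLoopA (len : Int) (perms : List (List Int)) (q : List Int) : Bool :=
  match perms with
  | [] => false
  | a :: rest =>
    let r := rotA len a q 0
    if r.1 then true else permLoopA len rest r.2

-- itertools.permutations(d) ported as Mathlib's List.permutations: the Boolean result
-- is an existence over the same collection of permutations, independent of their order.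
def check (dif : List Int) (d : List Int) : Bool :=
  permLoopA ((dif.length : Int) - 1) d.permutations dif

-- ===== PORT B =====
-- B's inner greedy while loop (same text as in Source B)
def frB (q : List Int) (len : Int) (b i : Int) : Int :=
  if h : i < len ∧ 0 ≤ b - PySem.List.pyGetD q i 0 then
    frB q len (b - PySem.List.pyGetD q i 0) (i + 1)
  else i
termination_by (len - i).toNat
decreasing_by omega

theorem testBit_one_shiftLeft (j k : Nat) : (1 <<< j).testBit k = decide (j = k) := by
  rw [Nat.one_shiftLeft]; exact Nat.testBit_two_pow ..

-- termination of dpE: clearing a set bit decreases the mask (cited in its decreasing_by)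
theorem xor_shift_lt (mask j : Nat) (h : mask.testBit j = true) : mask ^^^ (1 <<< j) < mask := by
  apply Nat.lt_of_testBit j
  · rw [Nat.testBit_xor, testBit_one_shiftLeft, h]; simp
  · exact h
  · intro k hk
    rw [Nat.testBit_xor, testBit_one_shiftLeft]
    have : j ≠ k := by omega
    simp [this]

-- Source B's 'ends(mask)': the memo dict only caches values; the port is the same
-- recursion (on masks, each recursive call strips one set bit) computing the same sets.
def dpE (q : List Int) (len : Int) (d : List Int) (mask : Nat) : List Int :=
  if h0 : mask = 0 then [-1]
  else
    (List.range d.length).foldl (fun res j =>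
      if h : mask.testBit j then
        (dpE q len d (mask ^^^ (1 <<< j))).foldl
          (fun res p => PySem.Set.add res (frB q len (d.getD j 0) (p + 1))) res
      else res) []
termination_by mask
decreasing_by exact xor_shift_lt mask j h

-- 'for r in range(n): q = dif[r:] + dif[:r]; … if length in ends(full): return True / return False'
def check_alt (dif : List Int) (d : List Int) : Bool :=
  let n := dif.length
  let len : Int := (n : Int) - 1
  let full : Nat := (1 <<< d.length) - 1
  (List.range n).any (fun r =>
    let q := PySem.List.slice dif (some (r : Int)) none ++ PySem.List.slice dif none (some (r : Int))
    (dpE q len d full).contains len)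

-- ===== PRECONDITION & SPEC =====
def Spec_check (dif : List Int) (d : List Int) (out : Bool) : Prop := out = check_alt dif d
instance (dif : List Int) (d : List Int) (out : Bool) : Decidable (Spec_check dif d out) := by unfold Spec_check; infer_instance

-- ===== CLAIM (what is proved, stated in full; the proofs are below) =====
def Claim_equal_check : Prop := ∀ (dif : List Int) (d : List Int), Dom_check dif d → Spec_check dif d (check dif d)

-- ===== LEMMAS AND PROOFS =====

theorem frB_eq_frA (q : List Int) (len b i : Int) : frB q len b i = frA q len b i := by
  fun_induction frB q len b i with
  | case1 b i h ih => rw [frA, dif_pos h]; exact ih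
  | case2 b i h => rw [frA, dif_neg h]

-- simA over a list with one more friend at the end
theorem simA_append (q : List Int) (len : Int) (a : List Int) (v : Int) :
    simA q len (a ++ [v]) = frA q len v (simA q len a + 1) := by
  simp [simA, List.foldl_append]

-- the subsequence of d selected by a bitmask (bit j ↔ d[j]); proof-side only
def sel (d : List Int) (mask : Nat) : List Int :=
  match d with
  | [] => []
  | b :: t => if mask % 2 = 1 then b :: sel t (mask / 2) else sel t (mask / 2)

theorem sel_zero (d : List Int) : sel d 0 = [] := by
  induction d with
  | nil => rfl
  | cons b t ih => simp [sel, ih]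

theorem sel_full (d : List Int) : sel d (2 ^ d.length - 1) = d := by
  induction d with
  | nil => rfl
  | cons b t ih =>
    have h2 : 0 < 2 ^ t.length := Nat.two_pow_pos _
    have : (2 : Nat) ^ (b :: t).length = 2 * 2 ^ t.length := by
      simp [List.length_cons, pow_succ]; ring
    rw [sel]
    rw [this]
    have hm : (2 * 2 ^ t.length - 1) % 2 = 1 := by omega
    have hd : (2 * 2 ^ t.length - 1) / 2 = 2 ^ t.length - 1 := by omega
    rw [if_pos hm, hd, ih]

theorem mem_sel (d : List Int) (mask : Nat) (v : Int) (h : v ∈ sel d mask) :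
    ∃ j, j < d.length ∧ mask.testBit j = true ∧ d.getD j 0 = v := by
  induction d generalizing mask with
  | nil => simp [sel] at h
  | cons b t ih =>
    rw [sel] at h
    by_cases hm : mask % 2 = 1
    · rw [if_pos hm] at h
      rcases List.mem_cons.mp h with h | h
      · exact ⟨0, by simp, by rw [Nat.testBit_zero]; simpa using hm, by simp [h.symm]⟩
      · obtain ⟨j, hj, hb, hv⟩ := ih _ h
        exact ⟨j + 1, by simpa using hj, by rw [Nat.testBit_succ]; exact hb, by simpa using hv⟩
    · rw [if_neg hm] at h
      obtain ⟨j, hj, hb, hv⟩ := ih _ h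
      exact ⟨j + 1, by simpa using hj, by rw [Nat.testBit_succ]; exact hb, by simpa using hv⟩

theorem xor_shift_mod_two (mask j : Nat) : (mask ^^^ (1 <<< (j + 1))) % 2 = mask % 2 := by
  have h0 : (mask ^^^ (1 <<< (j + 1))).testBit 0 = mask.testBit 0 := by
    rw [Nat.testBit_xor, testBit_one_shiftLeft]; simp
  rw [Nat.testBit_zero, Nat.testBit_zero, decide_eq_decide] at h0
  omega

theorem xor_shift_div_two (mask j : Nat) :
    (mask ^^^ (1 <<< (j + 1))) / 2 = (mask / 2) ^^^ (1 <<< j) := by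
  apply Nat.eq_of_testBit_eq
  intro i
  rw [Nat.testBit_div_two, Nat.testBit_xor, Nat.testBit_xor, Nat.testBit_div_two,
    testBit_one_shiftLeft, testBit_one_shiftLeft]
  congr 1
  simp

theorem xor_one_mod_two (mask : Nat) (h : mask % 2 = 1) : (mask ^^^ 1) % 2 = 0 := by
  have h0 : (mask ^^^ 1).testBit 0 = !(mask.testBit 0) := by
    rw [Nat.testBit_xor]
    have h1 : (1 : Nat).testBit 0 = true := rfl
    rw [h1]
    cases mask.testBit 0 <;> rfl
  rw [Nat.testBit_zero, Nat.testBit_zero, h] at h0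
  have h1 := of_decide_eq_false (by rw [h0]; rfl : decide ((mask ^^^ 1) % 2 = 1) = false)
  omega

theorem xor_one_div_two (mask : Nat) : (mask ^^^ 1) / 2 = mask / 2 := by
  apply Nat.eq_of_testBit_eq
  intro i
  rw [Nat.testBit_div_two, Nat.testBit_div_two, Nat.testBit_xor]
  have : (1 : Nat).testBit (i + 1) = false := by
    have := testBit_one_shiftLeft 0 (i + 1)
    simpa using this
  simp [this]

theorem sel_perm_cons (d : List Int) (mask j : Nat) (hb : mask.testBit j = true)
    (hj : j < d.length) :
    (sel d mask).Perm (d.getD j 0 :: sel d (mask ^^^ (1 <<< j))) := by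
  induction d generalizing mask j with
  | nil => simp at hj
  | cons b t ih =>
    cases j with
    | zero =>
      rw [Nat.testBit_zero] at hb
      have hm : mask % 2 = 1 := by simpa using hb
      have e1 : (1 : Nat) <<< 0 = 1 := rfl
      rw [sel, sel, e1, if_pos hm, if_neg (by rw [xor_one_mod_two mask hm]; omega),
        xor_one_div_two]
      simp
    | succ j =>
      rw [Nat.testBit_succ] at hb
      have hj' : j < t.length := by simpa using hj
      have hperm := ih (mask / 2) j hb hj'
      rw [sel, sel, xor_shift_div_two]
      have hg : (b :: t).getD (j + 1) 0 = t.getD j 0 := by simp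
      rw [hg]
      by_cases hm : mask % 2 = 1
      · rw [if_pos hm, if_pos (by rw [xor_shift_mod_two]; exact hm)]
        exact (hperm.cons b).trans (List.Perm.swap _ _ _)
      · rw [if_neg hm, if_neg (by rw [xor_shift_mod_two]; exact hm)]
        exact hperm

theorem sel_ne_nil (d : List Int) (mask : Nat) (h0 : mask ≠ 0) (hlt : mask < 2 ^ d.length) :
    sel d mask ≠ [] := by
  induction d generalizing mask with
  | nil => simp at hlt; omega
  | cons b t ih =>
    rw [sel]
    by_cases hm : mask % 2 = 1
    · rw [if_pos hm]; simp
    · rw [if_neg hm]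
      apply ih
      · omega
      · have : (2 : Nat) ^ (b :: t).length = 2 * 2 ^ t.length := by
          simp [List.length_cons, pow_succ]; ring
        omega

-- membership in the inner 'for p in ends(sub): res.add(step(p))' fold
theorem mem_fold_add (ps : List Int) (f : Int → Int) (init : List Int) (x : Int) :
    x ∈ ps.foldl (fun res p => PySem.Set.add res (f p)) init ↔ x ∈ init ∨ ∃ p ∈ ps, x = f p := by
  induction ps generalizing init with
  | nil => simp
  | cons p t ih =>
    simp only [List.foldl_cons, ih, PySem.Set.mem_add]
    constructor
    · rintro (⟨h | h⟩ | ⟨p', hp', hx⟩)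
      · exact Or.inl h
      · exact Or.inr ⟨p, by simp, h⟩
      · exact Or.inr ⟨p', by simp [hp'], hx⟩
    · rintro (h | ⟨p', hp', hx⟩)
      · exact Or.inl (Or.inl h)
      · rcases List.mem_cons.mp hp' with h | h
        · exact Or.inl (Or.inr (h ▸ hx))
        · exact Or.inr ⟨p', h, hx⟩

-- membership in the outer 'for j in range(m)' fold of dpE
theorem mem_fold_dp (q : List Int) (len : Int) (d : List Int) (mask : Nat)
    (js : List Nat) (init : List Int) (x : Int) :
    x ∈ js.foldl (fun res j =>
        if _h : mask.testBit j then
          (dpE q len d (mask ^^^ (1 <<< j))).foldl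
            (fun res p => PySem.Set.add res (frB q len (d.getD j 0) (p + 1))) res
        else res) init
      ↔ x ∈ init ∨ ∃ j ∈ js, mask.testBit j = true ∧
          ∃ p ∈ dpE q len d (mask ^^^ (1 <<< j)), x = frB q len (d.getD j 0) (p + 1) := by
  induction js generalizing init with
  | nil => simp
  | cons j t ih =>
    simp only [List.foldl_cons, ih]
    by_cases hb : mask.testBit j
    · rw [dif_pos hb, mem_fold_add]
      constructor
      · rintro (⟨h | ⟨p, hp, hx⟩⟩ | ⟨j', hj', hb', p, hp, hx⟩)
        · exact Or.inl h
        · exact Or.inr ⟨j, by simp, hb, p, hp, hx⟩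
        · exact Or.inr ⟨j', by simp [hj'], hb', p, hp, hx⟩
      · rintro (h | ⟨j', hj', hb', p, hp, hx⟩)
        · exact Or.inl (Or.inl h)
        · rcases List.mem_cons.mp hj' with h | h
          · subst h; exact Or.inl (Or.inr ⟨p, hp, hx⟩)
          · exact Or.inr ⟨j', h, hb', p, hp, hx⟩
    · rw [dif_neg hb]
      constructor
      · rintro (h | ⟨j', hj', hb', rest⟩)
        · exact Or.inl h
        · exact Or.inr ⟨j', by simp [hj'], hb', rest⟩
      · rintro (h | ⟨j', hj', hb', rest⟩)
        · exact Or.inl h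
        · rcases List.mem_cons.mp hj' with h | h
          · exact absurd (h ▸ hb') (by simpa using hb)
          · exact Or.inr ⟨j', h, hb', rest⟩

-- the DP invariant: dpE(mask) is exactly the set of greedy end positions over all
-- orderings of the friends selected by mask
theorem mem_dpE (q : List Int) (len : Int) (d : List Int) :
    ∀ mask, mask < 2 ^ d.length → ∀ x,
      (x ∈ dpE q len d mask ↔ ∃ a, a.Perm (sel d mask) ∧ simA q len a = x) := by
  intro mask
  induction mask using Nat.strong_induction_on with
  | _ mask ih =>
    intro hmask x
    by_cases h0 : mask = 0
    · subst h0
      rw [dpE]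
      simp only [sel_zero]
      constructor
      · intro hx
        exact ⟨[], List.Perm.refl _, by simp [simA]; simpa using (List.mem_singleton.mp hx).symm⟩
      · rintro ⟨a, ha, hx⟩
        rw [List.perm_nil.mp ha] at hx
        simp [simA] at hx
        simp [hx.symm]
    · rw [dpE, dif_neg h0]
      rw [mem_fold_dp]
      simp only [List.mem_nil_iff, false_or, List.mem_range]
      constructor
      · rintro ⟨j, hj, hb, p, hp, hx⟩
        have hlt := xor_shift_lt mask j hb
        obtain ⟨a', ha', hsim⟩ :=
          ((ih _ hlt (lt_trans hlt hmask) p).mp hp)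
        refine ⟨a' ++ [d.getD j 0], ?_, ?_⟩
        · exact ((List.perm_append_singleton _ _).trans (ha'.cons _)).trans
            (sel_perm_cons d mask j hb hj).symm
        · rw [simA_append, hsim, hx, frB_eq_frA]
      · rintro ⟨a, ha, hx⟩
        have hne : a ≠ [] := by
          intro h; subst h
          exact sel_ne_nil d mask h0 hmask (List.perm_nil.mp ha.symm)
        obtain ⟨a', v, rfl⟩ := (List.eq_nil_or_concat a).resolve_left hne
        rw [List.concat_eq_append] at *
        have hv : v ∈ sel d mask := ha.mem_iff.mp (by simp)
        obtain ⟨j, hj, hb, hgv⟩ := mem_sel d mask v hv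
        have hperm : (a' ++ [v]).Perm (v :: sel d (mask ^^^ (1 <<< j))) := by
          have := ha.trans (sel_perm_cons d mask j hb hj)
          rwa [hgv] at this
        have ha' : a'.Perm (sel d (mask ^^^ (1 <<< j))) :=
          ((List.perm_append_singleton v a').symm.trans hperm).cons_inv
        have hlt := xor_shift_lt mask j hb
        refine ⟨j, hj, hb, simA q len a', ?_, ?_⟩
        · exact (ih _ hlt (lt_trans hlt hmask) _).mpr ⟨a', ha', rfl⟩
        · rw [← hx, simA_append, hgv, frB_eq_frA]

-- iterated deque rotation (proof-side)
def rotIter (q : List Int) : Nat → List Int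
  | 0 => q
  | t + 1 => rotIter (q.drop 1 ++ q.take 1) t

theorem rotIter_nil (t : Nat) : rotIter [] t = [] := by
  induction t with
  | zero => rfl
  | succ t ih => simpa [rotIter] using ih

theorem rotIter_eq_rotate (q : List Int) (h : q ≠ []) (t : Nat) : rotIter q t = q.rotate t := by
  induction t generalizing q with
  | zero => simp [rotIter]
  | succ t ih =>
    have h1 : (1 : Nat) ≤ q.length := by
      cases q with | nil => simp at h | cons a l => simp
    have hr : q.drop 1 ++ q.take 1 = q.rotate 1 := (List.rotate_eq_drop_append_take h1).symm
    have hne : q.rotate 1 ≠ [] := by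
      intro hh; apply h
      have := congrArg List.length hh
      simp at this
      exact this
    rw [rotIter, hr, ih _ hne, List.rotate_rotate]
    congr 1
    omega

theorem rotIter_self (q : List Int) : rotIter q q.length = q := by
  by_cases h : q = []
  · subst h; exact rotIter_nil _
  · rw [rotIter_eq_rotate q h, List.rotate_length]

theorem rotA_true_iff (len : Int) (a : List Int) :
    ∀ q c, ((rotA len a q c).1 = true ↔
      ∃ t : Nat, c + (t : Int) ≤ len ∧ simA (rotIter q t) len a = len) := by
  intro q c
  fun_induction rotA len a q c with
  | case1 q c h hs =>
    simp only [true_iff]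
    exact ⟨0, by omega, by simpa [rotIter] using hs⟩
  | case2 q c h hs ih =>
    rw [ih]
    constructor
    · rintro ⟨t, ht, hsim⟩
      exact ⟨t + 1, by push_cast; omega, by simpa [rotIter] using hsim⟩
    · rintro ⟨t, ht, hsim⟩
      cases t with
      | zero => exact absurd (by simpa [rotIter] using hsim) hs
      | succ t => exact ⟨t, by push_cast at ht ⊢; omega, by simpa [rotIter] using hsim⟩
  | case3 q c h =>
    simp only [Bool.false_eq_true, false_iff]
    rintro ⟨t, ht, -⟩
    omega

theorem rotA_false_snd (len : Int) (a : List Int) :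
    ∀ q c, (rotA len a q c).1 = false → (rotA len a q c).2 = rotIter q (len + 1 - c).toNat := by
  intro q c
  fun_induction rotA len a q c with
  | case1 q c h hs => simp
  | case2 q c h hs ih =>
    intro hf
    rw [ih hf]
    have ht : (len + 1 - c).toNat = (len + 1 - (c + 1)).toNat + 1 := by omega
    rw [ht, rotIter]
  | case3 q c h =>
    intro _
    have : (len + 1 - c).toNat = 0 := by omega
    simp [this, rotIter]

theorem permLoopA_iff (q : List Int) (perms : List (List Int)) :
    (permLoopA ((q.length : Int) - 1) perms q = true ↔
      ∃ a ∈ perms, (rotA ((q.length : Int) - 1) a q 0).1 = true) := by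
  induction perms with
  | nil => simp [permLoopA]
  | cons a rest ih =>
    rw [permLoopA]
    by_cases hr1 : (rotA ((q.length : Int) - 1) a q 0).1 = true
    · rw [if_pos hr1]
      simp only [true_iff]
      exact ⟨a, by simp, hr1⟩
    · have hr1' : (rotA ((q.length : Int) - 1) a q 0).1 = false := by
        cases h : (rotA ((q.length : Int) - 1) a q 0).1
        · rfl
        · exact absurd h hr1
      have hq' : (rotA ((q.length : Int) - 1) a q 0).2 = q := by
        rw [rotA_false_snd _ _ _ _ hr1']
        have ht : ((q.length : Int) - 1 + 1 - 0).toNat = q.length := by omega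
        rw [ht, rotIter_self]
      rw [hr1', if_neg (by simp), hq', ih]
      constructor
      · rintro ⟨a', ha', hra'⟩
        exact ⟨a', by simp [ha'], hra'⟩
      · rintro ⟨a', ha', hra'⟩
        rcases List.mem_cons.mp ha' with h | h
        · subst h; exact absurd hra' hr1
        · exact ⟨a', h, hra'⟩

-- characterization of A
theorem check_iff (dif d : List Int) :
    (check dif d = true ↔
      ∃ a, a.Perm d ∧ ∃ t : Nat, (t : Int) ≤ (dif.length : Int) - 1 ∧
        simA (rotIter dif t) ((dif.length : Int) - 1) a = (dif.length : Int) - 1) := by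
  rw [check, permLoopA_iff]
  constructor
  · rintro ⟨a, ha, hra⟩
    rw [rotA_true_iff] at hra
    obtain ⟨t, ht, hsim⟩ := hra
    exact ⟨a, List.mem_permutations.mp ha, t, by omega, hsim⟩
  · rintro ⟨a, ha, t, ht, hsim⟩
    exact ⟨a, List.mem_permutations.mpr ha, (rotA_true_iff _ _ _ _).mpr ⟨t, by omega, hsim⟩⟩

-- characterization of B
theorem check_alt_iff (dif d : List Int) :
    (check_alt dif d = true ↔
      ∃ r < dif.length, ((dif.length : Int) - 1) ∈
        dpE (dif.drop r ++ dif.take r) ((dif.length : Int) - 1) d ((1 <<< d.length) - 1)) := by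
  rw [check_alt]
  simp only [List.any_eq_true, List.mem_range]
  constructor
  · rintro ⟨r, hr, hc⟩
    rw [PySem.List.slice_from_natCast, PySem.List.slice_to_natCast] at hc
    exact ⟨r, hr, List.contains_iff_mem.mp hc⟩
  · rintro ⟨r, hr, hc⟩
    refine ⟨r, hr, ?_⟩
    rw [PySem.List.slice_from_natCast, PySem.List.slice_to_natCast]
    exact List.contains_iff_mem.mpr hc

-- ===== VERDICT (by name: the statement is the Claim_ definition above) =====
theorem check_spec : Claim_equal_check := by
  intro dif d _
  unfold Spec_check
  rw [Bool.eq_iff_iff, check_iff, check_alt_iff]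
  have hfull : (1 <<< d.length) - 1 = 2 ^ d.length - 1 := by rw [Nat.one_shiftLeft]
  have hfull_lt : 2 ^ d.length - 1 < 2 ^ d.length := by
    have : 0 < 2 ^ d.length := Nat.two_pow_pos _
    omega
  constructor
  · rintro ⟨a, ha, t, ht, hsim⟩
    have hn : 0 < dif.length := by
      by_contra h
      have : dif.length = 0 := by omega
      rw [this] at ht
      push_cast at ht
      omega
    have htn : t < dif.length := by omega
    refine ⟨t, htn, ?_⟩
    rw [hfull, mem_dpE _ _ _ _ hfull_lt, sel_full]
    refine ⟨a, ha, ?_⟩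
    rw [← List.rotate_eq_drop_append_take (by omega : t ≤ dif.length),
      ← rotIter_eq_rotate dif (by intro h; rw [h] at hn; simp at hn) t]
    exact hsim
  · rintro ⟨r, hr, hmem⟩
    rw [hfull, mem_dpE _ _ _ _ hfull_lt, sel_full] at hmem
    obtain ⟨a, ha, hsim⟩ := hmem
    refine ⟨a, ha, r, by omega, ?_⟩
    rw [rotIter_eq_rotate dif (by intro h; rw [h] at hr; simp at hr) r,
      List.rotate_eq_drop_append_take (by omega : r ≤ dif.length)]
    exact hsim
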